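-- pv_equiv track=rewrite | github.com/Nothing-ray/StreamScribe-AI | src/preprocessor.py | segment_text_by_spaces
-- ===== SOURCE A (Python) =====
-- from typing import List, Optional, Tuple, Literal, Union, Callable
--
-- def segment_text_by_spaces(
--     text: str,
--     min_spaces: int,
--     max_spaces: int
-- ) -> List[Tuple[int, int]]:
--     """
--     按空格数量计算分段位置
--
--     返回:
--         [(start_idx, end_idx), ...] 分段位置列表
--     """
--     space_positions = [i for i, char in enumerate(text) if char == ' ']
--     segments: List[Tuple[int, int]] = []
--     start_idx = 0
--     i = 0
--
--     while i < len(space_positions):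
--         target_end = min(i + max_spaces, len(space_positions))
--
--         if len(space_positions) - i < min_spaces:
--             end_idx = len(text)
--         else:
--             end_idx = space_positions[target_end - 1] + 1
--
--         segments.append((start_idx, end_idx))
--         start_idx = end_idx
--         i = target_end
--
--     return segments
-- ===== SOURCE B (Python) =====
-- def segment_text_by_spaces(text, min_spaces, max_spaces):
--     """One pass over the characters, never building the list of all space
--     positions: record the end of each full group of max_spaces spaces, patch in
--     the partial final group, then pair ends with starts while applying the
--     too-few-remaining rule."""
--     if ' ' not in text:
--         return []
--     ends = []
--     count = 0
--     last = -1
--     for idx, ch in enumerate(text):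
--         if ch == ' ':
--             count += 1
--             last = idx
--             if count % max_spaces == 0:
--                 ends.append(idx + 1)
--     if count % max_spaces != 0:
--         ends.append(last + 1)
--     segments = []
--     start = 0
--     remaining = count
--     for e in ends:
--         if remaining < min_spaces:
--             e = len(text)
--         segments.append((start, e))
--         start = e
--         remaining -= max_spaces
--     return segments
-- ===== Notes on version B (the rewrite author's own statement) =====
-- stated objective: faster
-- what changed: B replaces A's precomputed list of all space indices plus a while loop that jumps through it by max_spaces with a single character scan that emits each group's end on the fly (counting spaces modulo max_spaces and patching in the partial last group), followed by a fold that pairs ends with starts and applies the too-few-remaining rule.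
import Mathlib
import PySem

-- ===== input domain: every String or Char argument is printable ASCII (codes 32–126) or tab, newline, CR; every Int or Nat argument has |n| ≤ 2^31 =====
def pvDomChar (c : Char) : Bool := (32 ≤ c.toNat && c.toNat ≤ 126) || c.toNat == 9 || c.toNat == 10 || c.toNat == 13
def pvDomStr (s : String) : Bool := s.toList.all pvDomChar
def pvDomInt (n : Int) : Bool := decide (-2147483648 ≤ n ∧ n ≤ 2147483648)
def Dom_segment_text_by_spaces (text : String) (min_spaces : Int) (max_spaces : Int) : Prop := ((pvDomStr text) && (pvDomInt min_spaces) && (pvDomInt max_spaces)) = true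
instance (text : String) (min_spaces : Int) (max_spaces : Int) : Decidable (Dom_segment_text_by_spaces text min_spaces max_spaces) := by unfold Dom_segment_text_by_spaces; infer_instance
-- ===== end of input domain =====

-- B replaces A's list of all space indices + while loop with a single scan emitting group
-- ends on the fly (count modulo max_spaces) plus a fold pairing ends with starts; the timing
-- run measured B faster (constant factor: no materialized positions list).

-- ===== PORT A =====
-- the while loop of A: state (i, start_idx, acc); fuel bounds the iteration count
-- (space_positions.length + 1 suffices whenever max_spaces ≥ 1; for max_spaces ≤ 0 with a
-- space present the Python loop diverges — excluded by Pre_ below).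
def pvA_loop (tlen min_spaces max_spaces : Int) (sp : List Int) :
    Nat → Int → Int → List (Int × Int) → List (Int × Int)
  | 0, _, _, acc => acc
  | fuel + 1, i, start_idx, acc =>
    if i < (sp.length : Int) then
      let target_end := min (i + max_spaces) (sp.length : Int)
      -- sp[target_end - 1]: in range on every input Pre_ admits; getD 0 is unreachable there
      let end_idx := if (sp.length : Int) - i < min_spaces then tlen
        else (PySem.List.pyGet? sp (target_end - 1)).getD 0 + 1
      pvA_loop tlen min_spaces max_spaces sp fuel target_end end_idx (acc ++ [(start_idx, end_idx)])
    else acc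

def segment_text_by_spaces (text : String) (min_spaces : Int) (max_spaces : Int) : List (Int × Int) :=
  let space_positions : List Int := (PySem.List.enumerate text.toList 0).filterMap
    (fun p => if p.2 = ' ' then some p.1 else none)
  pvA_loop ((text.toList.length : Nat) : Int) min_spaces max_spaces space_positions
    (space_positions.length + 1) 0 0 []

-- ===== PORT B =====
def segment_text_by_spaces_alt (text : String) (min_spaces : Int) (max_spaces : Int) : List (Int × Int) :=
  if ¬ (PySem.Str.isIn " " text) then [] else
  -- scan: state (count, last, ends)
  let st := (PySem.List.enumerate text.toList 0).foldl
    (fun (st : Int × Int × List Int) p =>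
      if p.2 = ' ' then
        let count := st.1 + 1
        (count, p.1,
          if PySem.Int.mod count max_spaces = 0 then st.2.2 ++ [p.1 + 1] else st.2.2)
      else st) (0, -1, [])
  let ends := if PySem.Int.mod st.1 max_spaces ≠ 0 then st.2.2 ++ [st.2.1 + 1] else st.2.2
  -- pairing fold: state (segments, start, remaining)
  let fin := ends.foldl
    (fun (st : List (Int × Int) × Int × Int) e =>
      let e' := if st.2.2 < min_spaces then ((text.toList.length : Nat) : Int) else e
      (st.1 ++ [(st.2.1, e')], e', st.2.2 - max_spaces))
    ([], 0, st.1)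
  fin.1

-- ===== PRECONDITION & SPEC =====
-- Pre_ excludes exactly the inputs where Python A never returns: with max_spaces ≤ 0 and at
-- least one space in the text, A's while loop does not advance and loops forever.
def Pre_segment_text_by_spaces (text : String) (_min_spaces : Int) (max_spaces : Int) : Prop :=
  1 ≤ max_spaces ∨ ' ' ∉ text.toList
instance (text : String) (min_spaces : Int) (max_spaces : Int) : Decidable (Pre_segment_text_by_spaces text min_spaces max_spaces) := by unfold Pre_segment_text_by_spaces; infer_instance

def pvWitness_segment_text_by_spaces : String × Int × Int := ("a b c d", 1, 2)

def Spec_segment_text_by_spaces (text : String) (min_spaces : Int) (max_spaces : Int) (out : List (Int × Int)) : Prop := out = segment_text_by_spaces_alt text min_spaces max_spaces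
instance (text : String) (min_spaces : Int) (max_spaces : Int) (out : List (Int × Int)) : Decidable (Spec_segment_text_by_spaces text min_spaces max_spaces out) := by unfold Spec_segment_text_by_spaces; infer_instance

-- ===== CLAIM (what is proved, stated in full; the proofs are below) =====
def Claim_equal_segment_text_by_spaces : Prop := ∀ (text : String) (min_spaces : Int) (max_spaces : Int), Dom_segment_text_by_spaces text min_spaces max_spaces → Pre_segment_text_by_spaces text min_spaces max_spaces → Spec_segment_text_by_spaces text min_spaces max_spaces (segment_text_by_spaces text min_spaces max_spaces)

-- ===== LEMMAS AND PROOFS =====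

-- space positions of cs, indexed from k (recursive form of A's filterMap over enumerate)
def pvSP : List Char → Int → List Int
  | [], _ => []
  | c :: cs, k => (if c = ' ' then [k] else []) ++ pvSP cs (k + 1)

-- ends emitted by B's scan for a run of space positions whose 1-based counts start at c+1
def pvHE (mx : Int) : List Int → Int → List Int
  | [], _ => []
  | p :: ps, c => (if PySem.Int.mod (c + 1) mx = 0 then [p + 1] else []) ++ pvHE mx ps (c + 1)

-- full ends list B pairs up, for the remaining space positions r after c consumed spaces
def pvE (mx : Int) (r : List Int) (c : Int) : List Int :=
  pvHE mx r c ++ (if PySem.Int.mod (c + r.length) mx ≠ 0 then [r.getLastD (-1) + 1] else [])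

-- the common segment recursion both programs compute: one segment per group of k spaces
def pvSpec (tlen mn : Int) (k : Nat) : List Int → Int → List (Int × Int)
  | [], _ => []
  | p :: ps, start =>
    let r := p :: ps
    let e := if (r.length : Int) < mn then tlen else r.getD (min (max k 1) r.length - 1) 0 + 1
    (start, e) :: pvSpec tlen mn k (r.drop (max k 1)) e
  termination_by r _ => r.length
  decreasing_by simp

lemma pvSP_eq (cs : List Char) (k : Int) :
    (PySem.List.enumerate cs k).filterMap (fun p => if p.2 = ' ' then some p.1 else none) = pvSP cs k := by
  induction cs generalizing k with
  | nil => simp [PySem.List.enumerate_nil, pvSP]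
  | cons c cs ih =>
      rw [PySem.List.enumerate_cons, List.filterMap_cons, pvSP]
      by_cases hc : c = ' ' <;> simp [hc, ih]

lemma pvSP_nil_of_not_mem (cs : List Char) (k : Int) (h : ' ' ∉ cs) : pvSP cs k = [] := by
  induction cs generalizing k with
  | nil => simp [pvSP]
  | cons c cs ih =>
      simp at h
      have : ¬ c = ' ' := fun hh => h.1 hh.symm
      simp [pvSP, this, ih _ h.2]

lemma pvHE_append (mx : Int) (xs ys : List Int) (c : Int) :
    pvHE mx (xs ++ ys) c = pvHE mx xs c ++ pvHE mx ys (c + xs.length) := by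
  induction xs generalizing c with
  | nil => simp [pvHE]
  | cons x xs ih => simp [pvHE, ih, add_assoc]; ring_nf

lemma pvHE_nil (mx : Int) (xs : List Int) (c : Int)
    (h : ∀ i : Nat, i < xs.length → ¬ mx ∣ (c + 1 + i)) : pvHE mx xs c = [] := by
  induction xs generalizing c with
  | nil => simp [pvHE]
  | cons x xs ih =>
      have h0 : ¬ mx ∣ (c + 1) := by simpa using h 0 (by simp)
      rw [pvHE]
      have : ¬ PySem.Int.mod (c + 1) mx = 0 := by
        rw [PySem.Int.mod_eq_zero_iff_dvd]; exact h0
      simp only [this, if_false, List.nil_append]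
      exact ih (c + 1) (fun i hi => by
        have := h (i + 1) (by simpa using hi)
        push_cast at this ⊢; convert this using 2; ring)

lemma pvHE_nil_of_short (mx : Int) (xs : List Int) (c : Int)
    (hc : mx ∣ c) (hlen : (xs.length : Int) < mx) : pvHE mx xs c = [] := by
  refine pvHE_nil mx xs c (fun i hi hdvd => ?_)
  have h1 : mx ∣ ((1 : Int) + i) := (Int.dvd_add_right hc).mp (by convert hdvd using 1; ring)
  have := Int.le_of_dvd (by positivity) h1
  omega

lemma pvHE_full (mx : Int) (hm : 1 ≤ mx) (xs : List Int) (c : Int)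
    (hc : mx ∣ c) (hlen : (xs.length : Int) = mx) :
    pvHE mx xs c = [xs.getD (mx.toNat - 1) 0 + 1] := by
  have hne : xs ≠ [] := by rintro rfl; simp at hlen; omega
  obtain h | ⟨ys, z, rfl⟩ := xs.eq_nil_or_concat
  · exact absurd h hne
  simp only [List.concat_eq_append] at hlen hne ⊢
  have hl : (ys.length : Int) + 1 = mx := by simpa using hlen
  rw [pvHE_append]
  have hys : (ys.length : Int) < mx := by omega
  rw [pvHE_nil_of_short mx ys c hc hys]
  have hdvd : PySem.Int.mod ((c + ys.length) + 1) mx = 0 := by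
    rw [PySem.Int.mod_eq_zero_iff_dvd]
    have : (c + ys.length) + 1 = c + mx := by omega
    rw [this]; exact Dvd.dvd.add hc dvd_rfl
  have hget : (ys ++ [z]).getD (mx.toNat - 1) 0 = z := by
    have : mx.toNat - 1 = ys.length := by omega
    rw [this, List.getD, List.getElem?_concat_length]; rfl
  simp only [pvHE, hdvd, if_pos, List.nil_append]
  rw [List.getD] at hget
  simp [hget]

lemma pvE_nil (mx : Int) (c : Int) (hc : mx ∣ c) : pvE mx [] c = [] := by
  have h0 : PySem.Int.mod c mx = 0 := by rw [PySem.Int.mod_eq_zero_iff_dvd]; exact hc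
  simp [pvE, pvHE, h0]

lemma pvE_short (mx : Int) (hm : 1 ≤ mx) (r : List Int) (c : Int) (hc : mx ∣ c)
    (hne : r ≠ []) (hlen : (r.length : Int) ≤ mx) :
    pvE mx r c = [r.getD (min (max mx.toNat 1) r.length - 1) 0 + 1] := by
  have hk : max mx.toNat 1 = mx.toNat := by omega
  have hlp : 0 < r.length := List.length_pos_iff.mpr hne
  have hv : r[r.length - 1]? = some r[r.length - 1] := List.getElem?_eq_getElem (by omega)
  have hg : r.getLastD (-1) = r.getD (r.length - 1) 0 := by
    rw [List.getLastD_eq_getLast?, List.getLast?_eq_getElem?, List.getD, hv]; rfl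
  rw [pvE, hk]
  rcases lt_or_eq_of_le hlen with hlt | heq
  · rw [pvHE_nil_of_short mx r c hc hlt]
    have hnd : ¬ mx ∣ (c + r.length) := by
      intro hd
      have h1 : mx ∣ (r.length : Int) := (Int.dvd_add_right hc).mp hd
      have := Int.le_of_dvd (by exact_mod_cast hlp) h1
      omega
    have hmod : PySem.Int.mod (c + r.length) mx ≠ 0 := by
      rw [Ne, PySem.Int.mod_eq_zero_iff_dvd]; exact hnd
    have hmin : min mx.toNat r.length = r.length := by omega
    rw [if_pos hmod, hmin, hg]
    simp
  · rw [pvHE_full mx hm r c hc heq]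
    have hmod : PySem.Int.mod (c + r.length) mx = 0 := by
      rw [PySem.Int.mod_eq_zero_iff_dvd, heq]
      exact Dvd.dvd.add hc dvd_rfl
    have hmin : min mx.toNat r.length = mx.toNat := by omega
    simp [hmod, hmin]

lemma pvE_long (mx : Int) (hm : 1 ≤ mx) (r : List Int) (c : Int) (hc : mx ∣ c)
    (hlen : mx < (r.length : Int)) :
    pvE mx r c = (r.getD (mx.toNat - 1) 0 + 1) :: pvE mx (r.drop mx.toNat) (c + mx) := by
  have hmlt : mx.toNat < r.length := by omega
  have htd : r = r.take mx.toNat ++ r.drop mx.toNat := (List.take_append_drop _ _).symm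
  have htl : ((r.take mx.toNat).length : Int) = mx := by simp; omega
  have hdne : r.drop mx.toNat ≠ [] := by
    apply List.ne_nil_of_length_pos; simp; omega
  rw [pvE]
  conv_lhs => rw [htd]
  rw [pvHE_append, pvHE_full mx hm _ c hc htl]
  have hgt : (r.take mx.toNat).getD (mx.toNat - 1) 0 = r.getD (mx.toNat - 1) 0 := by
    rw [List.getD, List.getD, List.getElem?_take_of_lt (by omega)]
  have hlast : (r.take mx.toNat ++ r.drop mx.toNat).getLastD (-1) = (r.drop mx.toNat).getLastD (-1) := by
    rw [List.getLastD_eq_getLast?, List.getLastD_eq_getLast?,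
      List.getLast?_append_of_ne_nil _ hdne]
  have hoff : c + ((r.take mx.toNat).length : Int) = c + mx := by rw [htl]
  have hcnt : c + ((r.take mx.toNat ++ r.drop mx.toNat).length : Int)
      = (c + mx) + ((r.drop mx.toNat).length : Int) := by
    simp; omega
  rw [hgt, hlast, hoff, hcnt, pvE]
  simp

lemma pvFoldB (tlen mn mx : Int) (hm : 1 ≤ mx) :
    ∀ (r : List Int) (start : Int) (c : Int), mx ∣ c → ∀ (acc : List (Int × Int)),
    ((pvE mx r c).foldl
      (fun (st : List (Int × Int) × Int × Int) e =>
        let e' := if st.2.2 < mn then tlen else e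
        (st.1 ++ [(st.2.1, e')], e', st.2.2 - mx))
      (acc, start, (r.length : Int))).1
    = acc ++ pvSpec tlen mn mx.toNat r start := by
  intro r start
  induction r, start using pvSpec.induct tlen mn mx.toNat with
  | case1 start => intro c hc acc; rw [pvE_nil mx c hc, pvSpec]; simp
  | case2 p ps start r e ih =>
    intro c hc acc
    by_cases hle : ((p :: ps).length : Int) ≤ mx
    · rw [pvE_short mx hm _ c hc (by simp) hle]
      have hdrop : (p :: ps).drop (max mx.toNat 1) = [] := by
        apply List.drop_eq_nil_of_le; simp at hle ⊢; omega
      rw [pvSpec, hdrop, pvSpec]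
      simp
    · have hlt : mx < ((p :: ps).length : Int) := by omega
      rw [pvE_long mx hm _ c hc hlt, pvSpec]
      have hk : max mx.toNat 1 = mx.toNat := by omega
      simp only [List.foldl_cons]
      have hmin : min (max mx.toNat 1) (p :: ps).length - 1 = mx.toNat - 1 := by
        simp only [List.length_cons] at hlt ⊢; omega
      have hrem : ((p :: ps).length : Int) - mx = (((p :: ps).drop (max mx.toNat 1)).length : Int) := by
        rw [hk, List.length_drop]; simp only [List.length_cons] at hlt ⊢; omega
      rw [hmin, hk]
      set e' := if ((p :: ps).length : Int) < mn then tlen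
        else (p :: ps).getD (mx.toNat - 1) 0 + 1 with he'
      have hee : e = e' := by
        show (if h : (((p :: ps)).length : Int) < mn then tlen
          else (p :: ps).getD (min (max mx.toNat 1) (p :: ps).length - 1) 0 + 1) = e'
        rw [dite_eq_ite, hmin, he']
      have hh := ih (c + mx) (Dvd.dvd.add hc dvd_rfl) (acc ++ [(start, e')])
      simp only [hk] at hh ⊢
      rw [← hee]
      rw [← hee] at hh
      rw [hk] at hrem
      rw [hrem]
      simpa using hh

lemma pvScan (mx : Int) (cs : List Char) :
    ∀ (k c last : Int) (acc : List Int),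
    (PySem.List.enumerate cs k).foldl
      (fun (st : Int × Int × List Int) p =>
        if p.2 = ' ' then
          let count := st.1 + 1
          (count, p.1, if PySem.Int.mod count mx = 0 then st.2.2 ++ [p.1 + 1] else st.2.2)
        else st) (c, last, acc)
    = (c + (pvSP cs k).length, (pvSP cs k).getLastD last, acc ++ pvHE mx (pvSP cs k) c) := by
  induction cs with
  | nil => intro k c last acc; simp [PySem.List.enumerate_nil, pvSP, pvHE]
  | cons ch cs ih =>
      intro k c last acc
      rw [PySem.List.enumerate_cons, List.foldl_cons]
      by_cases hch : ch = ' '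
      · subst hch
        rw [if_pos rfl, ih (k + 1) (c + 1) k _]
        have h1 : pvSP (' ' :: cs) k = k :: pvSP cs (k + 1) := by simp [pvSP]
        rw [h1, pvHE, List.getLastD_cons]
        refine Prod.ext ?_ (Prod.ext ?_ ?_)
        · simp; ring
        · simp
        · simp only []
          split_ifs <;> simp
      · rw [if_neg hch, ih (k + 1) c last acc]
        have h1 : pvSP (ch :: cs) k = pvSP cs (k + 1) := by simp [pvSP, hch]
        rw [h1]

lemma pvLoopA (tlen mn mx : Int) (hm : 1 ≤ mx) (sp : List Int) :
    ∀ (fuel : Nat) (i : Int), 0 ≤ i → i ≤ (sp.length : Int) → sp.length - i.toNat < fuel →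
    ∀ (start : Int) (acc : List (Int × Int)),
    pvA_loop tlen mn mx sp fuel i start acc
      = acc ++ pvSpec tlen mn mx.toNat (sp.drop i.toNat) start := by
  intro fuel
  induction fuel with
  | zero => intro i h0 h1 h2; omega
  | succ fuel ih =>
      intro i h0 h1 h2 start acc
      by_cases hlt : i < (sp.length : Int)
      · rw [pvA_loop, if_pos hlt]
        have hi : ((i.toNat : Nat) : Int) = i := Int.toNat_of_nonneg h0
        have hrlen : (sp.drop i.toNat).length = sp.length - i.toNat := by simp
        have hrne : sp.drop i.toNat ≠ [] := by
          apply List.ne_nil_of_length_pos; omega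
        set k : Nat := min mx.toNat (sp.drop i.toNat).length with hk
        have hk1 : 1 ≤ k := by omega
        have hte : min (i + mx) ((sp.length : Int)) = ((i.toNat + k : Nat) : Int) := by
          push_cast; omega
        have hget : (PySem.List.pyGet? sp (min (i + mx) ((sp.length : Int)) - 1)).getD 0
            = (sp.drop i.toNat).getD (k - 1) 0 := by
          rw [hte]
          have h01 : (0 : Int) ≤ ((i.toNat + k : Nat) : Int) - 1 := by push_cast; omega
          rw [PySem.List.pyGet?_of_nonneg sp h01]
          have ht : (((i.toNat + k : Nat) : Int) - 1).toNat = i.toNat + (k - 1) := by omega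
          simp only [ht, List.getD_eq_getElem?_getD, List.getElem?_drop]
        have hcond : ((sp.length : Int) - i < mn) = (((sp.drop i.toNat).length : Int) < mn) := by
          rw [hrlen]; congr 1; omega
        -- unfold pvSpec on the non-empty remainder
        obtain ⟨p, ps, hd⟩ : ∃ p ps, sp.drop i.toNat = p :: ps := by
          rcases h : sp.drop i.toNat with _ | ⟨p, ps⟩
          · exact absurd h hrne
          · exact ⟨p, ps, rfl⟩
        have hdropk : List.drop (max mx.toNat 1) (sp.drop i.toNat) = sp.drop (i.toNat + k) := by
          rw [List.drop_drop]
          have hmk : max mx.toNat 1 = mx.toNat := by omega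
          rw [hmk]
          rcases le_total mx.toNat (sp.drop i.toNat).length with hle2 | hle2
          · have : k = mx.toNat := by omega
            rw [this, Nat.add_comm]
          · have hknil : k = (sp.drop i.toNat).length := by omega
            rw [List.drop_eq_nil_of_le (as := sp) (by omega),
              List.drop_eq_nil_of_le (as := sp) (by omega)]
        have hlen4 : (p :: ps).length = (sp.drop i.toNat).length := by rw [hd]
        have h0' : (0 : Int) ≤ ((i.toNat + k : Nat) : Int) := by positivity
        have h1' : ((i.toNat + k : Nat) : Int) ≤ (sp.length : Int) := by push_cast; omega
        have h2' : sp.length - ((i.toNat + k : Nat) : Int).toNat < fuel := by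
          rw [Int.toNat_natCast]; omega
        have hiff : ((sp.length : Int) - i < mn) ↔ (((sp.drop i.toNat).length : Int) < mn) := by
          rw [hrlen]; omega
        have hE : (if (sp.length : Int) - i < mn then tlen
              else (PySem.List.pyGet? sp (min (i + mx) ((sp.length : Int)) - 1)).getD 0 + 1)
            = (if ((sp.drop i.toNat).length : Int) < mn then tlen
              else (sp.drop i.toNat).getD (k - 1) 0 + 1) :=
          if_congr hiff rfl (by rw [hget])
        show pvA_loop tlen mn mx sp fuel (min (i + mx) ((sp.length : Int)))
            (if (sp.length : Int) - i < mn then tlen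
              else (PySem.List.pyGet? sp (min (i + mx) ((sp.length : Int)) - 1)).getD 0 + 1)
            (acc ++ [(start, if (sp.length : Int) - i < mn then tlen
              else (PySem.List.pyGet? sp (min (i + mx) ((sp.length : Int)) - 1)).getD 0 + 1)])
          = acc ++ pvSpec tlen mn mx.toNat (sp.drop i.toNat) start
        rw [hE, hte]
        rw [ih ((i.toNat + k : Nat) : Int) h0' h1' h2' _ _, Int.toNat_natCast, ← hdropk, hd, pvSpec]
        have hmink : min (max mx.toNat 1) (p :: ps).length - 1 = k - 1 := by
          simp only [hlen4]; omega
        rw [hmink]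
        simp [hlen4]
      · rw [pvA_loop, if_neg hlt]
        have hnil : sp.drop i.toNat = [] := List.drop_eq_nil_of_le (by omega)
        rw [hnil, pvSpec]; simp

-- ===== VERDICT (by name: the statement is the Claim_ definition above) =====
lemma pvIsIn (l : List Char) : PySem.Chars.isIn [' '] l = true ↔ ' ' ∈ l := by
  rw [PySem.Chars.isIn_iff_infix]
  exact List.singleton_infix_iff ' ' l

-- ===== VERDICT (by name: the statement is the Claim_ definition above) =====
theorem segment_text_by_spaces_spec : Claim_equal_segment_text_by_spaces := by
  intro text mn mx hDom hPre
  show segment_text_by_spaces text mn mx = segment_text_by_spaces_alt text mn mx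
  rw [segment_text_by_spaces, segment_text_by_spaces_alt, pvSP_eq]
  by_cases hmem : ' ' ∈ text.toList
  · have hm : 1 ≤ mx := by
      rcases hPre with h | h
      · exact h
      · exact absurd hmem h
    rw [if_neg (by simp [pvIsIn text.toList, hmem]), pvScan mx text.toList 0 0 (-1) []]
    set sp := pvSP text.toList 0 with hspdef
    have hends : (if PySem.Int.mod (0 + (sp.length : Int)) mx ≠ 0
          then ([] ++ pvHE mx sp 0) ++ [sp.getLastD (-1) + 1] else [] ++ pvHE mx sp 0)
        = pvE mx sp 0 := by
      rw [pvE]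
      split_ifs <;> simp
    rw [pvLoopA ((text.toList.length : Nat) : Int) mn mx hm sp (sp.length + 1) 0
      le_rfl (by positivity) (by omega) 0 []]
    simp only [Int.toNat_zero, List.drop_zero, List.nil_append]
    have hfold := pvFoldB ((text.toList.length : Nat) : Int) mn mx hm sp 0 0 (dvd_zero mx) []
    simp only [List.nil_append] at hfold
    rw [← hfold]
    simp only [zero_add, List.nil_append] at hends ⊢
    rw [hends]
  · rw [pvSP_nil_of_not_mem text.toList 0 hmem]
    rw [if_pos (by simp [pvIsIn text.toList, hmem]), pvA_loop]
    simp
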